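-- pv_equiv track=rewrite | github.com/knowitall/yelp-dataset-challenge | parser_preparation.py | combine_multi_words
-- ===== SOURCE A (Python) =====
-- def combine_multi_words(sentence, multiword_attrs):
--   """Groups noun compounds and bigrams identified as multi-word attributes
--   together to be treated as a single unit by the parser"""
--   token_tag_pairs = []
--   last_tag = lastToken = None
--   last_TAT = ''
--   for TAT in sentence.split(' '):
--     split_TAT = TAT.rsplit('/', 1)
--     if len(split_TAT) < 2:
--       last_tag = lastToken = None
--       continue
--     token, tag = split_TAT
--
--     if token == '-LRB-':
--       token = '('
--     elif token == '-RRB-':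
--       token = ')'
--
--     if tag and last_tag and  \
--         ((tag.find('NN') != -1 and last_tag.find('NN') != -1) \
--         or (last_TAT.lower(), TAT.lower()) in multiword_attrs):
--       token_tag_pairs[-1] = (token_tag_pairs[-1][0] + '#' + token, 'NN')
--     else:
--       token_tag_pairs.append((token, tag))
--
--     (last_tag, lastToken, last_TAT) = (tag, token, TAT)
--
--   res = ''
--   for (token, tag) in token_tag_pairs:
--     res += token + '/' + tag + ' '
--   return res[:-1]
-- ===== SOURCE B (Python) =====
-- def combine_multi_words(sentence, multiword_attrs):
--   """Staged pipeline: parse tokens into records, cut the record stream into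
--   segments at invalid tokens, cut each segment into maximal glued runs by
--   index scanning + slicing, then render each run."""
--   def parse(tat):
--     parts = tat.rsplit('/', 1)
--     if len(parts) < 2:
--       return None
--     token, tag = parts
--     if token == '-LRB-':
--       token = '('
--     elif token == '-RRB-':
--       token = ')'
--     return (token, tag, tat)
--
--   def segments(tats):
--     segs, cur = [], []
--     for tat in tats:
--       rec = parse(tat)
--       if rec is None:
--         if cur:
--           segs.append(cur)
--         cur = []
--       else:
--         cur.append(rec)
--     if cur:
--       segs.append(cur)
--     return segs
--
--   def glue(a, b):
--     return bool(a[1]) and bool(b[1]) and (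
--       ('NN' in a[1] and 'NN' in b[1])
--       or (a[2].lower(), b[2].lower()) in multiword_attrs)
--
--   def chunks(seg):
--     out = []
--     i = 0
--     while i < len(seg):
--       j = i + 1
--       while j < len(seg) and glue(seg[j - 1], seg[j]):
--         j += 1
--       out.append(seg[i:j])
--       i = j
--     return out
--
--   def render(chunk):
--     if len(chunk) == 1:
--       return chunk[0][0] + '/' + chunk[0][1]
--     return '#'.join(r[0] for r in chunk) + '/NN'
--
--   return ' '.join(render(c) for seg in segments(sentence.split(' '))
--                   for c in chunks(seg))
-- ===== Notes on version B (the rewrite author's own statement) =====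
-- stated objective: alternative
-- what changed: A is one stateful pass that appends 'token/tag ' pairs, rewrites the LAST pair in place to merge, and slices off the trailing space; B is a staged pipeline with no last-element mutation: parse each token into a record, cut the record stream into segments at invalid tokens, cut each segment into maximal glued runs by index scanning and slicing, and render each run with joins.
import Mathlib
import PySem

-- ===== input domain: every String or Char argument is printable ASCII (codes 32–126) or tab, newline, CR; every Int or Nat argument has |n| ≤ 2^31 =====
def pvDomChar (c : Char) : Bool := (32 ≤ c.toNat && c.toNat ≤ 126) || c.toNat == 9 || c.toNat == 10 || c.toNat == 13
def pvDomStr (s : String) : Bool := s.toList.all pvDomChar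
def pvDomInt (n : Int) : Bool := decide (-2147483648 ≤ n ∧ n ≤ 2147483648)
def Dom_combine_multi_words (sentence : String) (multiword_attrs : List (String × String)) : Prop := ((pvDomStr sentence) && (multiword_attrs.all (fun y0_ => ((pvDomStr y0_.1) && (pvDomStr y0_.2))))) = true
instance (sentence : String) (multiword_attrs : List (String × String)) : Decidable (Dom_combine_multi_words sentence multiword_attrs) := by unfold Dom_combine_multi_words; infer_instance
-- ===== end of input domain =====

-- B replaces A's single stateful loop (which rewrites the last emitted pair in place) by a
-- staged pipeline: parse -> segments -> index-scanned maximal runs -> render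
-- (objective: alternative decomposition, same cost); proved equal on all inputs (A is total).

-- shared primitive: exact port of Python's  s.rsplit('/', 1)  — 'none' = no '/' (len < 2)
def pvRsplitSlash1 (cs : List Char) : Option (List Char × List Char) :=
  match cs.reverse.span (fun c => !(c == '/')) with
  | (_, []) => none
  | (tagRev, _ :: tokRev) => some (tokRev.reverse, tagRev.reverse)

-- ===== PORT A =====
-- Python's  xs[-1] = f(xs[-1])  (A reaches it only with xs nonempty)
def pvSetLast {α : Type} (xs : List α) (f : α → α) : List α :=
  match xs.getLast? with
  | none => xs
  | some x => xs.dropLast ++ [f x]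

-- loop state: (token_tag_pairs, last_tag (None = none), last_TAT); the dead variable lastToken
-- (assigned, never read) is omitted
def pvAStep (attrs : List (List Char × List Char))
    (st : List (List Char × List Char) × Option (List Char) × List Char)
    (TAT : List Char) : List (List Char × List Char) × Option (List Char) × List Char :=
  match pvRsplitSlash1 TAT with
  | none => (st.1, none, st.2.2)
  | some (tok0, tag) =>
    let token := if tok0 = "-LRB-".toList then "(".toList
                 else if tok0 = "-RRB-".toList then ")".toList else tok0
    let lastOk := match st.2.1 with | none => false | some lt => !lt.isEmpty
    let cond := !tag.isEmpty && lastOk &&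
        (((PySem.Chars.find tag ['N','N'] != -1) &&
          (PySem.Chars.find ((st.2.1).getD []) ['N','N'] != -1)) ||
         attrs.contains (PySem.Chars.lower st.2.2, PySem.Chars.lower TAT))
    if cond then
      (pvSetLast st.1 (fun p => (p.1 ++ '#' :: token, ['N','N'])), some tag, TAT)
    else
      (st.1 ++ [(token, tag)], some tag, TAT)

def combine_multi_words (sentence : String) (multiword_attrs : List (String × String)) : String :=
  let attrs := multiword_attrs.map (fun p => (p.1.toList, p.2.toList))
  let st := (PySem.Chars.splitOn sentence.toList [' ']).foldl (pvAStep attrs) ([], none, [])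
  let res := st.1.foldl (fun r p => r ++ p.1 ++ '/' :: p.2 ++ [' ']) []
  String.ofList (PySem.List.slice res none (some (-1)))   -- res[:-1]

-- ===== PORT B =====
-- a record is (token after -LRB-/-RRB- substitution, tag, original TAT)
abbrev pvRec := List Char × List Char × List Char

-- Source B parse(tat): None (invalid) or a record
def pvParse (TAT : List Char) : Option pvRec :=
  match pvRsplitSlash1 TAT with
  | none => none
  | some (tok0, tag) =>
    some (if tok0 = "-LRB-".toList then "(".toList
          else if tok0 = "-RRB-".toList then ")".toList else tok0, tag, TAT)

-- Source B segments(tats): cut the record stream at invalid tokens, dropping empty cuts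
def pvSegStep (st : List (List pvRec) × List pvRec) (tat : List Char) :
    List (List pvRec) × List pvRec :=
  match pvParse tat with
  | none => if st.2.isEmpty then (st.1, []) else (st.1 ++ [st.2], [])
  | some r => (st.1, st.2 ++ [r])

def pvSegments (tats : List (List Char)) : List (List pvRec) :=
  let st := tats.foldl pvSegStep ([], [])
  if st.2.isEmpty then st.1 else st.1 ++ [st.2]

-- Source B glue(a, b): may records a, b belong to one unit?
def pvGlue (attrs : List (List Char × List Char)) (a b : pvRec) : Bool :=
  !a.2.1.isEmpty && !b.2.1.isEmpty &&
  ((PySem.Chars.isIn ['N','N'] a.2.1 && PySem.Chars.isIn ['N','N'] b.2.1) ||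
   attrs.contains (PySem.Chars.lower a.2.2, PySem.Chars.lower b.2.2))

-- inner 'while j < len(seg) and glue(seg[j-1], seg[j]): j += 1'
-- (fuel = seg.length bounds the loop; the loop always stops within that many steps)
def pvRunEnd (attrs : List (List Char × List Char)) (seg : List pvRec) : Nat → Nat → Nat
  | 0, j => j
  | fuel+1, j =>
    if j < seg.length ∧ pvGlue attrs (seg.getD (j-1) ([],[],[])) (seg.getD j ([],[],[])) = true
    then pvRunEnd attrs seg fuel (j+1) else j

-- outer 'while i < len(seg): … out.append(seg[i:j]); i = j'  (same fuel bound)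
def pvChunksGo (attrs : List (List Char × List Char)) (seg : List pvRec) :
    Nat → Nat → List (List pvRec)
  | 0, _ => []
  | fuel+1, i =>
    if i < seg.length then
      PySem.List.slice seg (some (i : Int)) (some ((pvRunEnd attrs seg seg.length (i+1)) : Int)) ::
        pvChunksGo attrs seg fuel (pvRunEnd attrs seg seg.length (i+1))
    else []

def pvChunks (attrs : List (List Char × List Char)) (seg : List pvRec) : List (List pvRec) :=
  pvChunksGo attrs seg seg.length 0

-- Source B render(chunk)
def pvRenderChunk (c : List pvRec) : List Char :=
  if c.length = 1 then (c.headD ([],[],[])).1 ++ '/' :: (c.headD ([],[],[])).2.1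
  else PySem.Chars.join ['#'] (c.map (·.1)) ++ '/' :: ['N','N']

def combine_multi_words_alt (sentence : String) (multiword_attrs : List (String × String)) : String :=
  let attrs := multiword_attrs.map (fun p => (p.1.toList, p.2.toList))
  String.ofList (PySem.Chars.join [' ']
    ((pvSegments (PySem.Chars.splitOn sentence.toList [' '])).flatMap
      (fun seg => (pvChunks attrs seg).map pvRenderChunk)))

-- ===== PRECONDITION & SPEC =====
def Spec_combine_multi_words (sentence : String) (multiword_attrs : List (String × String)) (out : String) : Prop := out = combine_multi_words_alt sentence multiword_attrs
instance (sentence : String) (multiword_attrs : List (String × String)) (out : String) : Decidable (Spec_combine_multi_words sentence multiword_attrs out) := by unfold Spec_combine_multi_words; infer_instance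

-- ===== CLAIM (what is proved, stated in full; the proofs are below) =====
def Claim_equal_combine_multi_words : Prop := ∀ (sentence : String) (multiword_attrs : List (String × String)), Dom_combine_multi_words sentence multiword_attrs → Spec_combine_multi_words sentence multiword_attrs (combine_multi_words sentence multiword_attrs)

-- ===== LEMMAS AND PROOFS =====

-- A's step reformulated on the parsed stream: state (pairs, previous record or none)
def pvStepP (attrs : List (List Char × List Char))
    (st : List (List Char × List Char) × Option pvRec) (r? : Option pvRec) :
    List (List Char × List Char) × Option pvRec :=
  match r? with
  | none => (st.1, none)
  | some r =>
    let cond := match st.2 with | none => false | some p => pvGlue attrs p r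
    if cond then (pvSetLast st.1 (fun q => (q.1 ++ '#' :: r.1, ['N','N'])), some r)
    else (st.1 ++ [(r.1, r.2.1)], some r)

-- fold of pvStepP over the records of one segment
def pvFoldSeg (attrs : List (List Char × List Char)) (seg : List pvRec) :
    List (List Char × List Char) × Option pvRec :=
  seg.foldl (fun st r => pvStepP attrs st (some r)) ([], none)

def pvSegPairs (attrs : List (List Char × List Char)) (seg : List pvRec) :
    List (List Char × List Char) :=
  (pvFoldSeg attrs seg).1

-- recursive maximal-run chunking (proof-side mirror of the index scan)
def pvTakeRun (attrs : List (List Char × List Char)) :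
    pvRec → List pvRec → List pvRec × List pvRec
  | _, [] => ([], [])
  | p, x :: xs =>
    if pvGlue attrs p x then
      (x :: (pvTakeRun attrs x xs).1, (pvTakeRun attrs x xs).2)
    else ([], x :: xs)

theorem pvTakeRun_len (attrs : List (List Char × List Char)) (p : pvRec) (xs : List pvRec) :
    (pvTakeRun attrs p xs).2.length ≤ xs.length := by
  fun_induction pvTakeRun attrs p xs with
  | case1 p => simp
  | case2 p x xs h ih => simp; omega
  | case3 p x xs h => simp

def pvChunksI (attrs : List (List Char × List Char)) : List pvRec → List (List pvRec)
  | [] => []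
  | r :: rest =>
    (r :: (pvTakeRun attrs r rest).1) :: pvChunksI attrs (pvTakeRun attrs r rest).2
termination_by seg => seg.length
decreasing_by
  have := pvTakeRun_len attrs r rest
  simp; omega

theorem pvChunksI_cons (attrs : List (List Char × List Char)) (r : pvRec) (rest : List pvRec) :
    pvChunksI attrs (r :: rest) =
      (r :: (pvTakeRun attrs r rest).1) :: pvChunksI attrs (pvTakeRun attrs r rest).2 := by
  rw [pvChunksI.eq_def]

-- the pair A accumulates for one chunk
def pvPairOf (c : List pvRec) : List Char × List Char :=
  (PySem.Chars.join ['#'] (c.map (·.1)),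
   if c.length = 1 then (c.headD ([],[],[])).2.1 else ['N','N'])

-- what A's within-segment loop builds from an open pair q with previous record pr
def pvF (attrs : List (List Char × List Char)) :
    pvRec → (List Char × List Char) → List pvRec → List (List Char × List Char)
  | _, q, [] => [q]
  | p, q, x :: xs =>
    if pvGlue attrs p x then pvF attrs x (q.1 ++ '#' :: x.1, ['N','N']) xs
    else q :: pvF attrs x (x.1, x.2.1) xs

def pvExtend (q : List Char × List Char) (run : List pvRec) : List Char × List Char :=
  run.foldl (fun q x => (q.1 ++ '#' :: x.1, ['N','N'])) q

theorem pvFindNN_eq_isIn (s : List Char) :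
    (PySem.Chars.find s ['N','N'] != -1) = PySem.Chars.isIn ['N','N'] s := by
  cases h : PySem.Chars.isIn ['N','N'] s with
  | true =>
    have := PySem.Chars.find_ne_neg_one_iff (s := s) (sub := ['N','N'])
    simp only [bne_iff_ne]
    simp [this, ← PySem.Chars.isIn_iff_infix, h]
  | false =>
    have := PySem.Chars.find_eq_neg_one_iff (s := s) (sub := ['N','N'])
    simp only [bne_eq_false_iff_eq]
    simp [this, ← PySem.Chars.isIn_eq_false_iff, h]

-- relation between A's loop state and the parsed-stream state
def pvRelAP (a : List (List Char × List Char) × Option (List Char) × List Char)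
    (s : List (List Char × List Char) × Option pvRec) : Prop :=
  a.1 = s.1 ∧
  (match a.2.1, s.2 with
   | none, none => True
   | some t, some p => t = p.2.1 ∧ a.2.2 = p.2.2
   | _, _ => False)

theorem pvRelAP_step (attrs : List (List Char × List Char)) (a s) (t : List Char)
    (h : pvRelAP a s) : pvRelAP (pvAStep attrs a t) (pvStepP attrs s (pvParse t)) := by
  obtain ⟨a1, alast, aTAT⟩ := a
  obtain ⟨s1, sprev⟩ := s
  obtain ⟨h1, h3⟩ := h
  simp only at h1
  cases hr : pvRsplitSlash1 t with
  | none =>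
    refine ⟨?_, ?_⟩ <;> simp [pvAStep, pvStepP, pvParse, hr, h1]
  | some p0 =>
    obtain ⟨tok0, tag⟩ := p0
    cases alast with
    | none =>
      cases sprev with
      | some p => exact absurd h3 (by simp)
      | none =>
        refine ⟨?_, ?_⟩ <;> simp [pvAStep, pvStepP, pvParse, hr, h1]
    | some lt =>
      cases sprev with
      | none => exact absurd h3 (by simp)
      | some p =>
        have h3' : lt = p.2.1 ∧ aTAT = p.2.2 := h3
        obtain ⟨he1, he2⟩ := h3'
        subst he1
        subst he2
        have hcond : (!tag.isEmpty && !p.2.1.isEmpty &&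
              ((PySem.Chars.find tag ['N','N'] != -1) &&
                (PySem.Chars.find p.2.1 ['N','N'] != -1) ||
               attrs.contains (PySem.Chars.lower p.2.2, PySem.Chars.lower t)))
            = pvGlue attrs p
                (if tok0 = "-LRB-".toList then "(".toList
                 else if tok0 = "-RRB-".toList then ")".toList else tok0, tag, t) := by
          simp only [pvGlue]
          cases htag : tag.isEmpty <;> cases hlt : p.2.1.isEmpty <;>
            simp_all [pvFindNN_eq_isIn, Bool.and_comm]
        cases hg : pvGlue attrs p
            (if tok0 = "-LRB-".toList then "(".toList
             else if tok0 = "-RRB-".toList then ")".toList else tok0, tag, t) with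
        | true =>
          rw [hg] at hcond
          have hA : pvAStep attrs (a1, some p.2.1, p.2.2) t =
              (pvSetLast a1 (fun q => (q.1 ++ '#' ::
                 (if tok0 = "-LRB-".toList then "(".toList
                  else if tok0 = "-RRB-".toList then ")".toList else tok0), ['N','N'])),
               some tag, t) := by
            simp only [pvAStep, hr, Option.getD_some]
            rw [hcond]
            simp
          have hP : pvStepP attrs (s1, some p) (pvParse t) =
              (pvSetLast s1 (fun q => (q.1 ++ '#' ::
                 (if tok0 = "-LRB-".toList then "(".toList
                  else if tok0 = "-RRB-".toList then ")".toList else tok0), ['N','N'])),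
               some (if tok0 = "-LRB-".toList then "(".toList
                  else if tok0 = "-RRB-".toList then ")".toList else tok0, tag, t)) := by
            simp only [pvStepP, pvParse, hr]
            rw [hg]
            simp
          rw [hA, hP]
          exact ⟨by rw [h1], rfl, rfl⟩
        | false =>
          rw [hg] at hcond
          have hA : pvAStep attrs (a1, some p.2.1, p.2.2) t =
              (a1 ++ [((if tok0 = "-LRB-".toList then "(".toList
                  else if tok0 = "-RRB-".toList then ")".toList else tok0), tag)],
               some tag, t) := by
            simp only [pvAStep, hr, Option.getD_some]
            rw [hcond]
            simp
          have hP : pvStepP attrs (s1, some p) (pvParse t) =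
              (s1 ++ [((if tok0 = "-LRB-".toList then "(".toList
                  else if tok0 = "-RRB-".toList then ")".toList else tok0), tag)],
               some (if tok0 = "-LRB-".toList then "(".toList
                  else if tok0 = "-RRB-".toList then ")".toList else tok0, tag, t)) := by
            simp only [pvStepP, pvParse, hr]
            rw [hg]
            simp
          rw [hA, hP]
          exact ⟨by rw [h1], rfl, rfl⟩

theorem pvRelAP_fold (attrs : List (List Char × List Char)) (ts : List (List Char)) (a s)
    (h : pvRelAP a s) :
    pvRelAP (ts.foldl (pvAStep attrs) a) (ts.foldl (fun st t => pvStepP attrs st (pvParse t)) s) := by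
  induction ts generalizing a s with
  | nil => exact h
  | cons t ts ih => exact ih _ _ (pvRelAP_step attrs a s t h)

-- helper facts about pvSetLast
theorem pvSetLast_concat {α : Type} (xs : List α) (q : α) (f : α → α) :
    pvSetLast (xs ++ [q]) f = xs ++ [f q] := by
  simp [pvSetLast]

theorem pvSetLast_append {α : Type} (xs ys : List α) (f : α → α) (h : ys ≠ []) :
    pvSetLast (xs ++ ys) f = xs ++ pvSetLast ys f := by
  cases hgl : ys.getLast? with
  | none => exact absurd (List.getLast?_eq_none_iff.mp hgl) h
  | some y =>
    have h2 : (xs ++ ys).getLast? = some y := by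
      rw [List.getLast?_append_of_ne_nil _ h, hgl]
    simp [pvSetLast, hgl, h2, List.dropLast_append_of_ne_nil h, List.append_assoc]

theorem pvSetLast_ne_nil {α : Type} (xs : List α) (f : α → α) (h : xs ≠ []) :
    pvSetLast xs f ≠ [] := by
  cases hgl : xs.getLast? with
  | none => exact absurd (List.getLast?_eq_none_iff.mp hgl) h
  | some x => simp [pvSetLast, hgl]

theorem pvFoldSeg_snd_some (attrs : List (List Char × List Char)) (seg : List pvRec)
    (h : (pvFoldSeg attrs seg).2 ≠ none) : (pvFoldSeg attrs seg).1 ≠ [] := by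
  induction seg using List.reverseRecOn with
  | nil => exact absurd rfl h
  | append_singleton ys r ih =>
    have key : pvFoldSeg attrs (ys ++ [r]) = pvStepP attrs (pvFoldSeg attrs ys) (some r) := by
      rw [pvFoldSeg, pvFoldSeg, List.foldl_append]; rfl
    rw [key] at h ⊢
    cases hp : (pvFoldSeg attrs ys).2 with
    | none => simp [pvStepP, hp]
    | some p =>
      have h1 : (pvFoldSeg attrs ys).1 ≠ [] := ih (by simp [hp])
      cases hg : pvGlue attrs p r with
      | true => simpa [pvStepP, hp, hg] using pvSetLast_ne_nil _ _ h1
      | false => simp [pvStepP, hp, hg]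

-- segmentation invariant
def pvRelSeg (attrs : List (List Char × List Char))
    (s : List (List Char × List Char) × Option pvRec)
    (g : List (List pvRec) × List pvRec) : Prop :=
  s.1 = g.1.flatMap (pvSegPairs attrs) ++ (pvFoldSeg attrs g.2).1 ∧
  s.2 = (pvFoldSeg attrs g.2).2

theorem pvRelSeg_step (attrs : List (List Char × List Char)) (s g) (t : List Char)
    (h : pvRelSeg attrs s g) :
    pvRelSeg attrs (pvStepP attrs s (pvParse t)) (pvSegStep g t) := by
  obtain ⟨h1, h2⟩ := h
  cases hp : pvParse t with
  | none =>
    by_cases hc : g.2.isEmpty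
    · have : g.2 = [] := by simpa using hc
      refine ⟨?_, ?_⟩ <;>
        simp [pvStepP, pvSegStep, hp, h1, this, pvFoldSeg]
    · refine ⟨?_, ?_⟩ <;>
        simp [pvStepP, pvSegStep, hp, hc, h1, pvFoldSeg, pvSegPairs]
  | some r =>
    have hfold : pvFoldSeg attrs (g.2 ++ [r]) = pvStepP attrs (pvFoldSeg attrs g.2) (some r) := by
      rw [pvFoldSeg, pvFoldSeg, List.foldl_append]; rfl
    have hstep : pvStepP attrs s (some r) =
        (g.1.flatMap (pvSegPairs attrs) ++ (pvStepP attrs (pvFoldSeg attrs g.2) (some r)).1,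
         (pvStepP attrs (pvFoldSeg attrs g.2) (some r)).2) := by
      cases hprev : (pvFoldSeg attrs g.2).2 with
      | none => simp [pvStepP, h1, h2, hprev, List.append_assoc]
      | some p =>
        have hY : (pvFoldSeg attrs g.2).1 ≠ [] := pvFoldSeg_snd_some attrs g.2 (by simp [hprev])
        cases hg' : pvGlue attrs p r with
        | true =>
          simp [pvStepP, h1, h2, hprev, hg', pvSetLast_append _ _ _ hY]
        | false => simp [pvStepP, h1, h2, hprev, hg', List.append_assoc]
    refine ⟨?_, ?_⟩ <;> simp [pvSegStep, hp, hstep, hfold]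

theorem pvRelSeg_fold (attrs : List (List Char × List Char)) (ts : List (List Char)) (s g)
    (h : pvRelSeg attrs s g) :
    pvRelSeg attrs (ts.foldl (fun st t => pvStepP attrs st (pvParse t)) s) (ts.foldl pvSegStep g) := by
  induction ts generalizing s g with
  | nil => exact h
  | cons t ts ih => exact ih _ _ (pvRelSeg_step attrs s g t h)

-- within one segment: the fold builds pvF
theorem pvF_fold (attrs : List (List Char × List Char)) (xs : List pvRec)
    (pr : List (List Char × List Char)) (q : List Char × List Char) (p : pvRec) :
    (xs.foldl (fun st r => pvStepP attrs st (some r)) (pr ++ [q], some p)).1 =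
      pr ++ pvF attrs p q xs := by
  induction xs generalizing pr q p with
  | nil => simp [pvF]
  | cons x xs ih =>
    rw [List.foldl_cons]
    cases hg : pvGlue attrs p x with
    | true =>
      have hstep : pvStepP attrs (pr ++ [q], some p) (some x) =
          (pr ++ [(q.1 ++ '#' :: x.1, ['N','N'])], some x) := by
        simp [pvStepP, hg, pvSetLast_concat]
      rw [hstep, ih, pvF, hg]
      simp
    | false =>
      have hstep : pvStepP attrs (pr ++ [q], some p) (some x) =
          ((pr ++ [q]) ++ [(x.1, x.2.1)], some x) := by
        simp [pvStepP, hg]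
      rw [hstep, ih, pvF, hg]
      simp

theorem pvExtend_flat (run : List pvRec) (q : List Char × List Char) :
    pvExtend q run = (q.1 ++ run.flatMap (fun y => '#' :: y.1),
                      if run = [] then q.2 else ['N','N']) := by
  induction run generalizing q with
  | nil => simp [pvExtend]
  | cons y run ih =>
    show pvExtend (q.1 ++ '#' :: y.1, ['N','N']) run = _
    rw [ih]
    simp [List.flatMap_cons, List.append_assoc]

theorem pvJoin_cons_flatMap (sep : List Char) (a : List Char) (l : List (List Char)) :
    PySem.Chars.join sep (a :: l) = a ++ l.flatMap (fun y => sep ++ y) := by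
  induction l generalizing a with
  | nil => simp [PySem.Chars.join_singleton]
  | cons b l' ih => rw [PySem.Chars.join_cons_cons, ih b]; simp [List.append_assoc]

theorem pvPairOf_cons (x : pvRec) (run : List pvRec) :
    pvPairOf (x :: run) = pvExtend (x.1, x.2.1) run := by
  rw [pvExtend_flat, pvPairOf]
  simp [pvJoin_cons_flatMap, List.flatMap_map, List.length_eq_zero_iff]

theorem pvF_chunksI (attrs : List (List Char × List Char)) (xs : List pvRec)
    (p : pvRec) (q : List Char × List Char) :
    pvF attrs p q xs =
      pvExtend q (pvTakeRun attrs p xs).1 ::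
        (pvChunksI attrs (pvTakeRun attrs p xs).2).map pvPairOf := by
  fun_induction pvF attrs p q xs with
  | case1 p q => simp [pvTakeRun, pvChunksI, pvExtend]
  | case2 p q x xs hg ih =>
    rw [ih]
    simp only [pvTakeRun, hg, if_pos]
    rfl
  | case3 p q x xs hg ih =>
    rw [ih]
    simp only [pvTakeRun, hg, Bool.false_eq_true, if_false]
    rw [pvChunksI_cons]
    simp [pvExtend, pvPairOf_cons]

theorem pvSegPairs_chunksI (attrs : List (List Char × List Char)) (seg : List pvRec) :
    pvSegPairs attrs seg = (pvChunksI attrs seg).map pvPairOf := by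
  cases seg with
  | nil => simp [pvSegPairs, pvFoldSeg, pvChunksI]
  | cons r rest =>
    have hstep : pvStepP attrs ([], none) (some r) = ([] ++ [(r.1, r.2.1)], some r) := by
      simp [pvStepP]
    rw [pvSegPairs, pvFoldSeg, List.foldl_cons, hstep, pvF_fold, pvF_chunksI, pvChunksI_cons]
    simp [pvPairOf_cons]

-- the index-scanned chunking equals the recursive one
theorem pvTakeRun_append (attrs : List (List Char × List Char)) (p : pvRec) (xs : List pvRec) :
    (pvTakeRun attrs p xs).1 ++ (pvTakeRun attrs p xs).2 = xs := by
  fun_induction pvTakeRun attrs p xs with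
  | case1 p => rfl
  | case2 p x xs h ih => simpa using ih
  | case3 p x xs h => rfl

theorem pvRunEnd_ge (attrs : List (List Char × List Char)) (seg : List pvRec) :
    ∀ (fuel j : Nat), j ≤ pvRunEnd attrs seg fuel j := by
  intro fuel
  induction fuel with
  | zero => intro j; simp [pvRunEnd]
  | succ fuel ih =>
    intro j
    rw [pvRunEnd]
    split
    · exact le_trans (by omega) (ih (j+1))
    · exact le_rfl

theorem pvRunEnd_eq (attrs : List (List Char × List Char)) (seg : List pvRec) :
    ∀ (fuel j : Nat), seg.length - j ≤ fuel → 1 ≤ j →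
      pvRunEnd attrs seg fuel j =
        j + (pvTakeRun attrs (seg.getD (j-1) ([],[],[])) (seg.drop j)).1.length := by
  intro fuel
  induction fuel with
  | zero =>
    intro j hn hj
    have hge : seg.length ≤ j := by omega
    rw [pvRunEnd, List.drop_eq_nil_of_le hge]
    simp [pvTakeRun]
  | succ fuel ih =>
    intro j hn hj
    by_cases hlt : j < seg.length
    · have hdrop : seg.drop j = seg[j] :: seg.drop (j+1) := List.drop_eq_getElem_cons hlt
      have hgd : seg.getD j ([],[],[]) = seg[j] := List.getD_eq_getElem seg _ hlt
      cases hg : pvGlue attrs (seg.getD (j-1) ([],[],[])) (seg[j]) with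
      | true =>
        rw [pvRunEnd, if_pos ⟨hlt, by rw [hgd]; exact hg⟩]
        rw [ih (j+1) (by omega) (by omega)]
        have : (j + 1) - 1 = j := by omega
        rw [this, hgd, hdrop]
        simp only [pvTakeRun, hg, if_pos]
        simp; omega
      | false =>
        have hcnd : ¬(j < seg.length ∧
            pvGlue attrs (seg.getD (j-1) ([],[],[])) (seg.getD j ([],[],[])) = true) := by
          rw [hgd]
          intro hcontra
          rw [hcontra.2] at hg
          cases hg
        rw [pvRunEnd, if_neg hcnd]
        rw [hdrop]
        simp only [pvTakeRun, hg, Bool.false_eq_true, if_false]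
        simp
    · rw [pvRunEnd, if_neg (by omega)]
      rw [List.drop_eq_nil_of_le (by omega)]
      simp [pvTakeRun]

theorem pvChunksGo_eq (attrs : List (List Char × List Char)) (seg : List pvRec) :
    ∀ (fuel i : Nat), seg.length - i ≤ fuel →
      pvChunksGo attrs seg fuel i = pvChunksI attrs (seg.drop i) := by
  intro fuel
  induction fuel with
  | zero =>
    intro i hn
    rw [pvChunksGo, List.drop_eq_nil_of_le (by omega), pvChunksI]
  | succ fuel ih =>
    intro i hn
    by_cases hlt : i < seg.length
    · have hdrop : seg.drop i = seg[i] :: seg.drop (i+1) := List.drop_eq_getElem_cons hlt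
      have hgd : seg.getD i ([],[],[]) = seg[i] := List.getD_eq_getElem seg _ hlt
      have hre : pvRunEnd attrs seg seg.length (i+1) =
          (i+1) + (pvTakeRun attrs (seg[i]) (seg.drop (i+1))).1.length := by
        rw [pvRunEnd_eq attrs seg seg.length (i+1) (by omega) (by omega)]
        congr 2
        rw [show (i+1) - 1 = i from by omega, hgd]
      set t1 := (pvTakeRun attrs (seg[i]) (seg.drop (i+1))).1 with ht1
      set t2 := (pvTakeRun attrs (seg[i]) (seg.drop (i+1))).2 with ht2
      have happ : t1 ++ t2 = seg.drop (i+1) := pvTakeRun_append attrs _ _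
      have hslice : PySem.List.slice seg (some (i : Int))
            (some ((pvRunEnd attrs seg seg.length (i+1)) : Int)) = seg[i] :: t1 := by
        rw [hre, PySem.List.slice_natCast, hdrop]
        rw [show (i + 1) + t1.length - i = t1.length + 1 from by omega]
        rw [List.take_succ_cons, ← happ]
        simp
      have hrest : seg.drop (pvRunEnd attrs seg seg.length (i+1)) = t2 := by
        rw [hre, ← List.drop_drop, ← happ, List.drop_left]
      rw [pvChunksGo, if_pos hlt]
      rw [hdrop, pvChunksI_cons, ← ht1, ← ht2]
      refine congrArg₂ _ ?_ ?_
      · simpa using hslice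
      · rw [ih (pvRunEnd attrs seg seg.length (i+1))
            (by have := pvRunEnd_ge attrs seg seg.length (i+1); omega), hrest]
    · rw [pvChunksGo, if_neg (by omega), List.drop_eq_nil_of_le (by omega), pvChunksI]

theorem pvChunks_eq (attrs : List (List Char × List Char)) (seg : List pvRec) :
    pvChunks attrs seg = pvChunksI attrs seg := by
  simpa using pvChunksGo_eq attrs seg seg.length 0 (by omega)

-- rendering
theorem pvRenderChunk_eq (c : List pvRec) :
    pvRenderChunk c = (pvPairOf c).1 ++ '/' :: (pvPairOf c).2 := by
  cases c with
  | nil => simp [pvRenderChunk, pvPairOf, PySem.Chars.join_nil]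
  | cons x c' =>
    cases c' with
    | nil => simp [pvRenderChunk, pvPairOf, PySem.Chars.join_singleton]
    | cons y c'' => simp [pvRenderChunk, pvPairOf]

theorem pvRender_eq (es : List (List Char)) :
    (es.flatMap (fun e => e ++ [' '])).dropLast = PySem.Chars.join [' '] es := by
  induction es with
  | nil => simp [PySem.Chars.join_nil]
  | cons e l ih =>
    cases l with
    | nil => simp [PySem.Chars.join_singleton]
    | cons b l' =>
      have hne : (b :: l').flatMap (fun e => e ++ [' ']) ≠ [] := by
        simp [List.flatMap_cons, List.append_assoc]
      rw [List.flatMap_cons, PySem.Chars.join_cons_cons, ← ih,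
        List.dropLast_append_of_ne_nil hne, List.append_assoc]

theorem pvFoldl_app {α : Type} (es : List α) (g : α → List Char) (init : List Char) :
    es.foldl (fun r e => r ++ g e) init = init ++ es.flatMap g := by
  induction es generalizing init with
  | nil => simp
  | cons e l ih => simp [List.foldl_cons, ih, List.flatMap_cons, List.append_assoc]

-- ===== VERDICT (by name: the statement is the Claim_ definition above) =====
theorem combine_multi_words_spec : Claim_equal_combine_multi_words := by
  intro sentence multiword_attrs _
  unfold Spec_combine_multi_words combine_multi_words combine_multi_words_alt
  set attrs := multiword_attrs.map (fun p => (p.1.toList, p.2.toList)) with hattrs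
  set ts := PySem.Chars.splitOn sentence.toList [' '] with hts
  have hAP := pvRelAP_fold attrs ts ([], none, []) ([], none) ⟨rfl, trivial⟩
  have hSeg := pvRelSeg_fold attrs ts ([], none) ([], []) ⟨rfl, rfl⟩
  obtain ⟨h1, -⟩ := hAP
  obtain ⟨h2, -⟩ := hSeg
  have hpairs : (ts.foldl (pvAStep attrs) ([], none, [])).1 =
      (pvSegments ts).flatMap (pvSegPairs attrs) := by
    rw [h1, h2, pvSegments]
    by_cases hc : (ts.foldl pvSegStep ([], [])).2.isEmpty
    · have he : (ts.foldl pvSegStep ([], [])).2 = [] := by simpa using hc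
      simp [he, pvFoldSeg]
    · simp [hc, pvSegPairs]
  simp only
  rw [hpairs]
  congr 1
  rw [show (fun (r : List Char) (p : List Char × List Char) => r ++ p.1 ++ '/' :: p.2 ++ [' ']) =
      (fun r p => r ++ (p.1 ++ '/' :: p.2 ++ [' '])) from by funext r p; simp [List.append_assoc]]
  rw [pvFoldl_app _ (fun p : List Char × List Char => p.1 ++ '/' :: p.2 ++ [' '])]
  rw [PySem.List.slice_to_neg_one, List.nil_append]
  have hE : ((pvSegments ts).flatMap (pvSegPairs attrs)).flatMap
        (fun p : List Char × List Char => p.1 ++ '/' :: p.2 ++ [' '])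
      = ((pvSegments ts).flatMap (fun seg => (pvChunks attrs seg).map pvRenderChunk)).flatMap
        (fun e => e ++ [' ']) := by
    simp only [pvSegPairs_chunksI, ← pvChunks_eq, List.flatMap_assoc, List.flatMap_map,
      pvRenderChunk_eq]
  rw [hE, pvRender_eq]
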